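-- pv_equiv track=rewrite | github.com/almlab/SmileTrain | uc2otus.py | otu_table
-- ===== SOURCE A (Python) =====
-- def counts(table, sample, otu):
--     '''get counts from table structure, or 0 if sample or otu missing'''
--     if sample in table:
--         if otu in table[sample]:
--             return table[sample][otu]
--
--     return 0
--
-- def otu_table(table, otus=None, samples=None):
--     '''
--     Output lines of an OTU table.
--
--     table : dictionary of dictionaries
--         {sample => {otu => abundance, ...}, ...}
--     otus : list or iterator of strings (default None)
--         otu ids in row order; or just make a new sorted list
--     samples : list or iterator of strings (default None)
--         sample names in column order; or just make a new sorted list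
--
--     yields : strings
--         lines in the otu table
--     '''
--
--     # make our own otu list if necessary
--     if samples is None:
--         samples = sorted(table.keys())
--
--     # and our own samples list
--     if otus is None:
--         # concatenate the lists of keys
--         otus = []
--         for sample in table:
--             otus += table[sample].keys()
--
--         # remove duplicates and sort
--         otus = sorted(list(set(otus)))
--
--     # first, output the header/sample line
--     yield "\t".join(['OTU_ID'] + samples)
--
--     # loop over rows
--     for otu in otus:
--         yield "\t".join([otu] + [str(counts(table, sample, otu)) for sample in samples])
-- ===== SOURCE B (Python) =====
-- def otu_table(table, otus=None, samples=None):
--     '''Same output as A, but built by one scatter pass over the table's actual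
--     entries into prepopulated "0" rows, instead of a counts() lookup per cell.'''
--     if samples is None:
--         samples = sorted(table.keys())
--     if otus is None:
--         otus = sorted({otu for sample in table for otu in table[sample]})
--
--     # column positions of every sample name (duplicates get every position)
--     cols = {}
--     for j, sample in enumerate(samples):
--         cols.setdefault(sample, []).append(j)
--
--     # one prepopulated row per distinct otu id
--     rows = {otu: ['0'] * len(samples) for otu in otus}
--
--     # single scatter pass over the entries actually present in the table
--     for sample in table:
--         if sample in cols:
--             for otu, abundance in table[sample].items():
--                 if otu in rows:
--                     value = str(abundance)
--                     for j in cols[sample]: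
--                         rows[otu][j] = value
--
--     yield "\t".join(['OTU_ID'] + samples)
--     for otu in otus:
--         yield "\t".join([otu] + rows[otu])
-- ===== Notes on version B (the rewrite author's own statement) =====
-- stated objective: faster
-- what changed: B replaces A's per-cell counts() function call with its two hash lookups per cell by one scatter pass over the table's actual entries into prepopulated '0' rows, via a sample-to-column-positions index.
import Mathlib
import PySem

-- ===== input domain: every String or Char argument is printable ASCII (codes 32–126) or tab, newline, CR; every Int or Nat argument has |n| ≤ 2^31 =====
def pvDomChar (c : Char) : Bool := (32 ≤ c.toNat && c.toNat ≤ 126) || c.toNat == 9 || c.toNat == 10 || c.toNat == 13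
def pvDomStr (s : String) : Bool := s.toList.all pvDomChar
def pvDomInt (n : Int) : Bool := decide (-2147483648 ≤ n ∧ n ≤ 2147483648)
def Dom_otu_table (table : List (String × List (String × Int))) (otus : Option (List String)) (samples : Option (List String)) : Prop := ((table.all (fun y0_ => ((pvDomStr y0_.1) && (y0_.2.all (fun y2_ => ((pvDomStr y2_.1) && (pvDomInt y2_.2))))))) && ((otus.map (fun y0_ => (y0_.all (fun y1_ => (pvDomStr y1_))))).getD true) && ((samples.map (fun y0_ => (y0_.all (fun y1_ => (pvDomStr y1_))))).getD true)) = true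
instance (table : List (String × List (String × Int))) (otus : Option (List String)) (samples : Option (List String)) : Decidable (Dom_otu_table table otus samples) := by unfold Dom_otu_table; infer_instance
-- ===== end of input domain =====

-- B replaces A's per-cell counts() lookups with one scatter pass over the table's
-- entries into prepopulated "0" rows (objective: faster, measured; return value only —
-- both Pythons are generators, ported as the list of yielded lines).

-- ===== PORT A =====
-- the dict-of-dicts argument, marshalled from the association list (Python dict semantics)
def pvToDict (table : List (String × List (String × Int))) : PySem.Dict String (PySem.Dict String Int) :=
  PySem.Dict.ofList (table.map (fun p => (p.1, PySem.Dict.ofList p.2)))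

-- helper counts(table, sample, otu)
def pvCounts (t : PySem.Dict String (PySem.Dict String Int)) (sample otu : String) : Int :=
  if t.contains sample then
    if (t.getD sample PySem.Dict.empty).contains otu then
      (t.getD sample PySem.Dict.empty).getD otu 0
    else 0
  else 0

def otu_table (table : List (String × List (String × Int))) (otus : Option (List String)) (samples : Option (List String)) : List String :=
  let t := pvToDict table
  -- if samples is None: samples = sorted(table.keys())
  let samples' := samples.getD (PySem.List.sorted t.keys (fun x => x) false)
  -- if otus is None: concatenate key lists, then sorted(list(set(otus)))
  let otus' := otus.getD
    (PySem.List.sorted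
      (PySem.Set.ofList (t.keys.foldl (fun acc s => acc ++ (t.getD s PySem.Dict.empty).keys) []))
      (fun x => x) false)
  -- header, then one row per otu, each cell a fresh counts() lookup
  PySem.Str.join "\t" ("OTU_ID" :: samples') ::
    otus'.map (fun o =>
      PySem.Str.join "\t" (o :: samples'.map (fun s => PySem.Int.toStr (pvCounts t s o))))

-- ===== PORT B =====
def otu_table_alt (table : List (String × List (String × Int))) (otus : Option (List String)) (samples : Option (List String)) : List String :=
  let t := pvToDict table
  let samples' := samples.getD (PySem.List.sorted t.keys (fun x => x) false)
  -- sorted({otu for sample in table for otu in table[sample]})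
  let otus' := otus.getD
    (PySem.List.sorted
      (PySem.Set.ofList (t.keys.flatMap (fun s => (t.getD s PySem.Dict.empty).keys)))
      (fun x => x) false)
  -- cols: column positions of every sample name
  let cols := (PySem.List.enumerate samples' 0).foldl
    (fun d p => d.modify p.2 [] (fun js => js ++ [p.1])) PySem.Dict.empty
  -- one prepopulated '0' row per distinct otu id
  let rows0 := otus'.foldl
    (fun d o => d.insert o (List.replicate samples'.length "0")) PySem.Dict.empty
  -- single scatter pass over the entries actually present in the table
  let rows := t.items.foldl (fun rs p =>
      if cols.contains p.1 then
        p.2.items.foldl (fun rs q =>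
          if rs.contains q.1 then
            (cols.getD p.1 []).foldl (fun rs j =>
              rs.modify q.1 [] (fun r => PySem.List.pySetD r j (PySem.Int.toStr q.2))) rs
          else rs) rs
      else rs) rows0
  PySem.Str.join "\t" ("OTU_ID" :: samples') ::
    otus'.map (fun o => PySem.Str.join "\t" (o :: rows.getD o []))

-- ===== PRECONDITION & SPEC =====
def Spec_otu_table (table : List (String × List (String × Int))) (otus : Option (List String)) (samples : Option (List String)) (out : List String) : Prop := out = otu_table_alt table otus samples
instance (table : List (String × List (String × Int))) (otus : Option (List String)) (samples : Option (List String)) (out : List String) : Decidable (Spec_otu_table table otus samples out) := by unfold Spec_otu_table; infer_instance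

-- ===== CLAIM (what is proved, stated in full; the proofs are below) =====
def Claim_equal_otu_table : Prop := ∀ (table : List (String × List (String × Int))) (otus : Option (List String)) (samples : Option (List String)), Dom_otu_table table otus samples → Spec_otu_table table otus samples (otu_table table otus samples)

-- ===== LEMMAS AND PROOFS =====

-- proof-side names for B's three intermediate structures (each is definitionally the port's fold)
def pvW (o v : String) (js : List Int) (rs : PySem.Dict String (List String)) : PySem.Dict String (List String) :=
  js.foldl (fun rs j => rs.modify o [] (fun r => PySem.List.pySetD r j v)) rs

def pvInner (js : List Int) (M : List (String × Int)) (rs : PySem.Dict String (List String)) :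
    PySem.Dict String (List String) :=
  M.foldl (fun rs q => if rs.contains q.1 then pvW q.1 (PySem.Int.toStr q.2) js rs else rs) rs

def pvCols (S : List String) : PySem.Dict String (List Int) :=
  (PySem.List.enumerate S 0).foldl (fun d p => d.modify p.2 [] (fun js => js ++ [p.1])) PySem.Dict.empty

def pvScat (cols : PySem.Dict String (List Int)) (L : List (String × PySem.Dict String Int))
    (rs : PySem.Dict String (List String)) : PySem.Dict String (List String) :=
  L.foldl (fun rs p => if cols.contains p.1 then pvInner (cols.getD p.1 []) p.2.items rs else rs) rs

def pvRows0 (n : Nat) (O : List String) : PySem.Dict String (List String) :=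
  O.foldl (fun d o => d.insert o (List.replicate n "0")) PySem.Dict.empty

lemma pvInner_cons (js : List Int) (q : String × Int) (M : List (String × Int))
    (rs : PySem.Dict String (List String)) :
    pvInner js (q :: M) rs = pvInner js M (if rs.contains q.1 then pvW q.1 (PySem.Int.toStr q.2) js rs else rs) := rfl

lemma pvScat_cons (cols : PySem.Dict String (List Int)) (p : String × PySem.Dict String Int)
    (L : List (String × PySem.Dict String Int)) (rs : PySem.Dict String (List String)) :
    pvScat cols (p :: L) rs =
      pvScat cols L (if cols.contains p.1 then pvInner (cols.getD p.1 []) p.2.items rs else rs) := rfl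

-- cols characterisation
lemma pvCols_getD (S : List String) (s : String) :
    (pvCols S).getD s [] =
      ((PySem.List.enumerate S 0).filter (fun p => p.2 == s)).map (fun p => p.1) := by
  have h1 : pvCols S =
      ((PySem.List.enumerate S 0).map (fun p => (p.2, p.1))).foldl
        (fun d p => d.modify p.1 [] (fun js => js ++ [p.2])) PySem.Dict.empty := by
    rw [List.foldl_map]; rfl
  rw [h1, PySem.Dict.getD_foldl_modify_append]
  simp only [List.filter_map, List.map_map, PySem.Dict.getD_empty, List.nil_append]
  rfl

lemma pvCols_mem (S : List String) (s : String) (j : Int) :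
    j ∈ (pvCols S).getD s [] ↔ ∃ (k : Nat), ∃ (h : k < S.length), j = (k : Int) ∧ S[k] = s := by
  rw [pvCols_getD]
  simp only [List.mem_map, List.mem_filter, PySem.List.mem_enumerate_iff]
  constructor
  · rintro ⟨p, ⟨⟨k, hk, rfl⟩, hs⟩, rfl⟩
    refine ⟨k, hk, by simp, by simpa using hs⟩
  · rintro ⟨k, hk, rfl, hs⟩
    exact ⟨((k : Int), S[k]), ⟨⟨k, hk, by simp⟩, by simp [hs]⟩, rfl⟩

lemma pvCols_contains (S : List String) (s : String) :
    (pvCols S).contains s = true ↔ s ∈ S := by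
  rw [PySem.Dict.contains_iff_mem_keys]
  have h := PySem.Dict.keys_foldl_modify_key (ν := List Int) (PySem.List.enumerate S 0)
    (fun p => p.2) [] (fun d p js => js ++ [p.1]) PySem.Dict.empty
  show s ∈ (pvCols S).keys ↔ _
  unfold pvCols
  rw [h]
  simp [PySem.Set.mem_update, PySem.List.map_snd_enumerate, PySem.Dict.keys_empty]

lemma pvCols_nonneg (S : List String) (s : String) : ∀ i ∈ (pvCols S).getD s [], 0 ≤ i := by
  intro i hi
  rcases (pvCols_mem S s i).mp hi with ⟨k, hk, rfl, _⟩
  exact Int.natCast_nonneg k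

lemma pvCols_not_mem_of_ne (S : List String) (j : Nat) (hj : j < S.length) (s : String)
    (hne : s ≠ S[j]) : (j : Int) ∉ (pvCols S).getD s [] := by
  intro hmem
  rcases (pvCols_mem S s _).mp hmem with ⟨k, hk, hkj, hks⟩
  have : k = j := by exact_mod_cast hkj.symm
  subst this
  exact hne hks.symm

-- rows0 characterisation
lemma pvRows0_getD (n : Nat) (O : List String) (o : String) (d : PySem.Dict String (List String)) :
    (O.foldl (fun d o => d.insert o (List.replicate n "0")) d).getD o [] =
      if o ∈ O then List.replicate n "0" else d.getD o [] := by
  induction O generalizing d with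
  | nil => simp
  | cons o' O ih =>
    simp only [List.foldl_cons, ih, List.mem_cons]
    by_cases h : o ∈ O
    · simp [h]
    · by_cases h2 : o = o' <;> simp [h, h2, PySem.Dict.getD_insert]

lemma pvRows0_contains (n : Nat) (O : List String) (o : String) :
    (pvRows0 n O).contains o = true ↔ o ∈ O := by
  rw [PySem.Dict.contains_iff_mem_keys]
  unfold pvRows0
  rw [PySem.Dict.keys_foldl_insert (f := fun _ _ => List.replicate n "0")]
  simp [PySem.Set.mem_update, PySem.Dict.keys_empty]

-- single-row writes
lemma pvW_getD (o v : String) (js : List Int) (rs : PySem.Dict String (List String)) (o' : String) :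
    (pvW o v js rs).getD o' [] =
      if o' = o then js.foldl (fun r j => PySem.List.pySetD r j v) (rs.getD o []) else rs.getD o' [] := by
  induction js generalizing rs with
  | nil =>
    simp only [pvW, List.foldl_nil]
    split <;> simp_all
  | cons j js ih =>
    simp only [pvW, List.foldl_cons] at *
    rw [ih]
    by_cases h : o' = o <;>
      simp [h, PySem.Dict.getD_modify]

lemma pvW_contains (o v : String) (js : List Int) (rs : PySem.Dict String (List String))
    (hc : rs.contains o = true) (o' : String) :
    (pvW o v js rs).contains o' = rs.contains o' := by
  induction js generalizing rs with
  | nil => simp [pvW]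
  | cons j js ih =>
    simp only [pvW, List.foldl_cons] at *
    rw [ih]
    · by_cases h : o' = o <;> simp [h, PySem.Dict.contains_modify, hc]
    · simp [PySem.Dict.contains_modify, hc]

lemma pvRowW_foldl_length (v : String) (js : List Int) (r : List String) :
    (js.foldl (fun r j => PySem.List.pySetD r j v) r).length = r.length := by
  induction js generalizing r with
  | nil => rfl
  | cons j js ih => simp [ih, PySem.List.length_pySetD]

lemma pvRowW_cell_not_mem (v : String) (js : List Int) (hnn : ∀ i ∈ js, 0 ≤ i)
    (j : Nat) (hj : (j : Int) ∉ js) (r : List String) :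
    (js.foldl (fun r i => PySem.List.pySetD r i v) r)[j]? = r[j]? := by
  induction js generalizing r with
  | nil => rfl
  | cons i js ih =>
    simp only [List.foldl_cons]
    rw [ih (fun x hx => hnn x (List.mem_cons_of_mem _ hx)) (fun h => hj (List.mem_cons_of_mem _ h))]
    rw [PySem.List.pySetD_of_nonneg _ _ (hnn i (List.mem_cons_self))]
    rw [List.getElem?_set]
    have : i.toNat ≠ j := by
      intro h
      apply hj
      have := hnn i List.mem_cons_self
      simp [← h, Int.toNat_of_nonneg this]
    simp [this]

lemma pvRowW_cell_mem (v : String) (js : List Int) (hnn : ∀ i ∈ js, 0 ≤ i)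
    (j : Nat) (hj : (j : Int) ∈ js) (r : List String) (hlen : j < r.length) :
    (js.foldl (fun r i => PySem.List.pySetD r i v) r)[j]? = some v := by
  induction js generalizing r with
  | nil => simp at hj
  | cons i js ih =>
    simp only [List.foldl_cons]
    rcases List.mem_cons.mp hj with h | h
    · by_cases h2 : (j : Int) ∈ js
      · exact ih (fun x hx => hnn x (List.mem_cons_of_mem _ hx)) h2 _
          (by rw [PySem.List.length_pySetD]; exact hlen)
      · rw [pvRowW_cell_not_mem v js (fun x hx => hnn x (List.mem_cons_of_mem _ hx)) j h2]
        rw [PySem.List.pySetD_of_nonneg _ _ (hnn i (List.mem_cons_self))]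
        rw [List.getElem?_set]
        have hi : i.toNat = j := by simp [← h]
        simp [hi, hlen]
    · exact ih (fun x hx => hnn x (List.mem_cons_of_mem _ hx)) h _
        (by rw [PySem.List.length_pySetD]; exact hlen)

-- one table entry's scatter over one row-dict
lemma pvInner_contains (js : List Int) (M : List (String × Int)) (rs : PySem.Dict String (List String))
    (o' : String) : (pvInner js M rs).contains o' = rs.contains o' := by
  induction M generalizing rs with
  | nil => rfl
  | cons q M ih =>
    rw [pvInner_cons]
    by_cases h : rs.contains q.1
    · rw [if_pos h, ih, pvW_contains _ _ _ _ h]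
    · rw [if_neg h, ih]

lemma pvInner_getD_absent (js : List Int) (M : List (String × Int)) (o : String)
    (h : o ∉ M.map Prod.fst) (rs : PySem.Dict String (List String)) :
    (pvInner js M rs).getD o [] = rs.getD o [] := by
  induction M generalizing rs with
  | nil => rfl
  | cons q M ih =>
    simp only [List.map_cons, List.mem_cons, not_or] at h
    rw [pvInner_cons]
    by_cases hg : rs.contains q.1
    · rw [if_pos hg, ih h.2, pvW_getD, if_neg h.1]
    · rw [if_neg hg, ih h.2]

lemma pvInner_getD_present (js : List Int) (M : List (String × Int)) (o : String) (ab : Int)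
    (hM : (M.map Prod.fst).Nodup) (hab : (o, ab) ∈ M) (rs : PySem.Dict String (List String))
    (hc : rs.contains o = true) :
    (pvInner js M rs).getD o [] =
      js.foldl (fun r j => PySem.List.pySetD r j (PySem.Int.toStr ab)) (rs.getD o []) := by
  induction M generalizing rs with
  | nil => simp at hab
  | cons q M ih =>
    simp only [List.map_cons, List.nodup_cons] at hM
    rw [pvInner_cons]
    rcases List.mem_cons.mp hab with h | h
    · subst h
      rw [if_pos hc]
      have habs : o ∉ M.map Prod.fst := hM.1
      rw [pvInner_getD_absent js M o habs, pvW_getD, if_pos rfl]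
    · have hne : q.1 ≠ o := by
        intro he
        exact hM.1 (he ▸ (List.mem_map.mpr ⟨(o, ab), h, rfl⟩))
      by_cases hg : rs.contains q.1
      · rw [if_pos hg, ih hM.2 h _ (by rw [pvW_contains _ _ _ _ hg, hc]), pvW_getD,
          if_neg (Ne.symm hne)]
      · rw [if_neg hg, ih hM.2 h rs hc]

lemma pvInner_cell (js : List Int) (hnn : ∀ i ∈ js, 0 ≤ i) (j : Nat) (hj : (j : Int) ∉ js)
    (M : List (String × Int)) (rs : PySem.Dict String (List String)) (o : String) :
    ((pvInner js M rs).getD o [])[j]? = (rs.getD o [])[j]? := by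
  induction M generalizing rs with
  | nil => rfl
  | cons q M ih =>
    rw [pvInner_cons]
    by_cases hg : rs.contains q.1
    · rw [if_pos hg, ih, pvW_getD]
      by_cases h : o = q.1
      · rw [if_pos h, pvRowW_cell_not_mem _ js hnn j hj, h]
      · rw [if_neg h]
    · rw [if_neg hg, ih]

lemma pvInner_length (js : List Int) (M : List (String × Int)) (rs : PySem.Dict String (List String))
    (o : String) : ((pvInner js M rs).getD o []).length = ((rs.getD o []).length) := by
  induction M generalizing rs with
  | nil => rfl
  | cons q M ih =>
    rw [pvInner_cons]
    by_cases hg : rs.contains q.1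
    · rw [if_pos hg, ih, pvW_getD]
      by_cases h : o = q.1
      · rw [if_pos h, pvRowW_foldl_length, h]
      · rw [if_neg h]
    · rw [if_neg hg, ih]

-- the whole scatter pass, cell by cell
lemma pvScat_cell_absent (S : List String) (L : List (String × PySem.Dict String Int)) (j : Nat)
    (hj : j < S.length) (hs : S[j] ∉ L.map Prod.fst) (rs : PySem.Dict String (List String)) (o : String) :
    ((pvScat (pvCols S) L rs).getD o [])[j]? = (rs.getD o [])[j]? := by
  induction L generalizing rs with
  | nil => rfl
  | cons p L ih =>
    simp only [List.map_cons, List.mem_cons, not_or] at hs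
    rw [pvScat_cons]
    by_cases hg : (pvCols S).contains p.1
    · rw [if_pos hg, ih hs.2,
        pvInner_cell _ (pvCols_nonneg S p.1) j (pvCols_not_mem_of_ne S j hj p.1 (fun h => hs.1 h.symm))]
    · rw [if_neg hg, ih hs.2]

lemma pvScat_length (S : List String) (L : List (String × PySem.Dict String Int))
    (rs : PySem.Dict String (List String)) (o : String) :
    ((pvScat (pvCols S) L rs).getD o []).length = (rs.getD o []).length := by
  induction L generalizing rs with
  | nil => rfl
  | cons p L ih =>
    rw [pvScat_cons]
    by_cases hg : (pvCols S).contains p.1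
    · rw [if_pos hg, ih, pvInner_length]
    · rw [if_neg hg, ih]

lemma pvScat_cell_present (S : List String) (L : List (String × PySem.Dict String Int)) (j : Nat)
    (hj : j < S.length) (hL : (L.map Prod.fst).Nodup) (inner : PySem.Dict String Int)
    (hmemL : (S[j], inner) ∈ L) (hinner : inner.keys.Nodup) (o : String)
    (rs : PySem.Dict String (List String)) (hc : rs.contains o = true)
    (hlen : j < (rs.getD o []).length) :
    ((pvScat (pvCols S) L rs).getD o [])[j]? =
      if inner.contains o then some (PySem.Int.toStr (inner.getD o 0)) else (rs.getD o [])[j]? := by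
  induction L generalizing rs with
  | nil => simp at hmemL
  | cons p L ih =>
    simp only [List.map_cons, List.nodup_cons] at hL
    rw [pvScat_cons]
    rcases List.mem_cons.mp hmemL with h | h
    · have hg : (pvCols S).contains (S[j]) = true :=
        (pvCols_contains S _).mpr (List.getElem_mem hj)
      have hp1 : p.1 = S[j] := by rw [← h]
      have habs : S[j] ∉ L.map Prod.fst := hp1 ▸ hL.1
      rw [← h, if_pos hg, pvScat_cell_absent S L j hj habs]
      have hjs : (j : Int) ∈ (pvCols S).getD (S[j]) [] :=
        (pvCols_mem S _ _).mpr ⟨j, hj, rfl, rfl⟩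
      have hksnd : inner.items.map Prod.fst = inner.keys := rfl
      by_cases hco : inner.contains o = true
      · have hok : o ∈ inner.keys := (PySem.Dict.contains_iff_mem_keys inner o).mp hco
        have : ∃ ab, (o, ab) ∈ inner.items := by
          rw [← hksnd] at hok
          rcases List.mem_map.mp hok with ⟨q, hq, hq1⟩
          exact ⟨q.2, by rw [← hq1]; simpa using hq⟩
        rcases this with ⟨ab, hab⟩
        have hgd : inner.getD o 0 = ab := PySem.Dict.getD_of_mem_items inner hab hinner 0
        rw [if_pos hco, pvInner_getD_present _ _ o ab (hksnd ▸ hinner) hab rs hc,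
          pvRowW_cell_mem _ _ (pvCols_nonneg S _) j hjs _ hlen, hgd]
      · have hok : o ∉ inner.items.map Prod.fst := by
          rw [hksnd]
          intro hmem
          exact hco ((PySem.Dict.contains_iff_mem_keys inner o).mpr hmem)
        rw [if_neg hco, pvInner_getD_absent _ _ o hok rs]
    · have hne : p.1 ≠ S[j] := by
        intro he
        exact hL.1 (he ▸ (List.mem_map.mpr ⟨(S[j], inner), h, rfl⟩))
      by_cases hg : (pvCols S).contains p.1
      · have hcell := pvInner_cell ((pvCols S).getD p.1 []) (pvCols_nonneg S p.1) j
          (pvCols_not_mem_of_ne S j hj p.1 hne) p.2.items rs o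
        rw [if_pos hg, ih hL.2 h _ (by rw [pvInner_contains, hc])
            (by rw [pvInner_length]; exact hlen), hcell]
      · rw [if_neg hg, ih hL.2 h rs hc hlen]

-- the marshalled dict has unique keys and unique inner keys
lemma mem_items_update {κ ν : Type} [BEq κ] [LawfulBEq κ] (l : List (κ × ν)) (d : PySem.Dict κ ν)
    (p : κ × ν) (h : p ∈ (d.update l).items) : p ∈ d.items ∨ p ∈ l := by
  induction l generalizing d with
  | nil => exact Or.inl h
  | cons q l ih =>
    have h2 : p ∈ ((d.insert q.1 q.2).update l).items := h
    rcases ih _ h2 with h3 | h3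
    · rcases (PySem.Dict.mem_items_insert d q.1 q.2 p).mp h3 with h4 | h4
      · exact Or.inr (List.mem_cons.mpr (Or.inl (by rw [h4])))
      · exact Or.inl h4.1
    · exact Or.inr (List.mem_cons_of_mem _ h3)

lemma pvToDict_inner_nodup (table : List (String × List (String × Int)))
    (p : String × PySem.Dict String Int) (h : p ∈ (pvToDict table).items) : p.2.keys.Nodup := by
  rcases mem_items_update _ PySem.Dict.empty p h with h2 | h2
  · simp [PySem.Dict.empty] at h2
  · rcases List.mem_map.mp h2 with ⟨q, _, hq⟩
    rw [← hq]
    exact PySem.Dict.nodup_keys_ofList q.2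

-- B's finished row for an emitted otu is exactly A's row of counts() cells
lemma pvRow_eq (t : PySem.Dict String (PySem.Dict String Int)) (S O : List String) (o : String)
    (hO : o ∈ O) (hkeys : t.keys.Nodup) (hin : ∀ p ∈ t.items, p.2.keys.Nodup) :
    (pvScat (pvCols S) t.items (pvRows0 S.length O)).getD o [] =
      S.map (fun s => PySem.Int.toStr (pvCounts t s o)) := by
  have hrow0 : (pvRows0 S.length O).getD o [] = List.replicate S.length "0" := by
    rw [show (pvRows0 S.length O).getD o [] =
        (O.foldl (fun d o => d.insert o (List.replicate S.length "0")) PySem.Dict.empty).getD o []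
      from rfl, pvRows0_getD, if_pos hO]
  have hc0 : (pvRows0 S.length O).contains o = true := (pvRows0_contains S.length O o).mpr hO
  have hkfst : t.items.map Prod.fst = t.keys := rfl
  apply List.ext_getElem?
  intro j
  by_cases hj : j < S.length
  · have hRHS : (S.map (fun s => PySem.Int.toStr (pvCounts t s o)))[j]? =
        some (PySem.Int.toStr (pvCounts t (S[j]) o)) := by
      rw [List.getElem?_map, List.getElem?_eq_getElem hj]
      rfl
    rw [hRHS]
    by_cases hct : t.contains (S[j]) = true
    · have hmemk : S[j] ∈ t.keys := (PySem.Dict.contains_iff_mem_keys t _).mp hct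
      have : ∃ inner, (S[j], inner) ∈ t.items := by
        rw [← hkfst] at hmemk
        rcases List.mem_map.mp hmemk with ⟨q, hq, hq1⟩
        exact ⟨q.2, by rw [← hq1]; simpa using hq⟩
      rcases this with ⟨inner, hmem⟩
      have hgd : t.getD (S[j]) PySem.Dict.empty = inner :=
        PySem.Dict.getD_of_mem_items t hmem hkeys _
      rw [pvScat_cell_present S t.items j hj (hkfst ▸ hkeys) inner hmem
        (hin _ hmem) o _ hc0 (by rw [hrow0, List.length_replicate]; exact hj)]
      unfold pvCounts
      rw [if_pos hct, hgd]
      by_cases hco : inner.contains o = true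
      · rw [if_pos hco, if_pos hco]
      · rw [if_neg hco, if_neg hco, hrow0, List.getElem?_replicate, if_pos hj]
        rfl
    · have habs : S[j] ∉ t.items.map Prod.fst := by
        rw [hkfst]
        intro hmem
        exact hct ((PySem.Dict.contains_iff_mem_keys t _).mpr hmem)
      rw [pvScat_cell_absent S t.items j hj habs, hrow0, List.getElem?_replicate, if_pos hj]
      unfold pvCounts
      rw [if_neg hct]
      rfl
  · have h1 : ((pvScat (pvCols S) t.items (pvRows0 S.length O)).getD o [])[j]? = none := by
      rw [List.getElem?_eq_none_iff, pvScat_length, hrow0, List.length_replicate]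
      omega
    have h2 : (S.map (fun s => PySem.Int.toStr (pvCounts t s o)))[j]? = none := by
      rw [List.getElem?_eq_none_iff, List.length_map]
      omega
    rw [h1, h2]

-- ===== VERDICT (by name: the statement is the Claim_ definition above) =====
theorem otu_table_spec : Claim_equal_otu_table := by
  intro table otus samples _
  unfold Spec_otu_table
  simp only [otu_table, otu_table_alt]
  rw [PySem.List.foldl_append_eq_flatMap, List.nil_append]
  congr 1
  apply List.map_congr_left
  intro o hO
  congr 1
  congr 1
  exact (pvRow_eq (pvToDict table)
    ((samples.getD (PySem.List.sorted (pvToDict table).keys (fun x => x) false)))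
    _ o hO (PySem.Dict.nodup_keys_ofList _) (pvToDict_inner_nodup table)).symm
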